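-- pv_equiv track=rewrite | github.com/chentianle1117/semantic_latent_explorer | analysis/migrate_to_multisession.py | fix_semicolons
-- ===== SOURCE A (Python) =====
-- def fix_semicolons(text):
--     """Convert lines ending with ';' to end with ',' (for embedded JS blocks)."""
--     lines = text.split('\n')
--     result = []
--     for line in lines:
--         stripped = line.rstrip()
--         if stripped.endswith(';'):
--             result.append(line.rstrip()[:-1] + ',')
--         else:
--             result.append(line)
--     return '\n'.join(result)
-- ===== SOURCE B (Python) =====
-- def fix_semicolons(text):
--     """Convert lines ending with ';' to end with ',' — single character scan.
--
--     'held' buffers the current run of an optional ';' followed by trailing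
--     whitespace; at each end of line it collapses to ',' iff it starts with ';'.
--     """
--     out = []
--     held = ''
--     for c in text:
--         if c == '\n':
--             out.append(',' if held.startswith(';') else held)
--             out.append('\n')
--             held = ''
--         elif c == ';':
--             out.append(held)
--             held = ';'
--         elif c.isspace():
--             held += c
--         else:
--             out.append(held)
--             out.append(c)
--             held = ''
--     out.append(',' if held.startswith(';') else held)
--     return ''.join(out)
-- ===== Notes on version B (the rewrite author's own statement) =====
-- stated objective: alternative
-- what changed: Replaced the split-into-lines/rstrip/endswith/join pipeline by a single left-to-right character scan that buffers the pending run of a semicolon plus trailing whitespace and flushes it at each line end, collapsing the run to a comma exactly when it starts with a semicolon.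
import Mathlib
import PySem

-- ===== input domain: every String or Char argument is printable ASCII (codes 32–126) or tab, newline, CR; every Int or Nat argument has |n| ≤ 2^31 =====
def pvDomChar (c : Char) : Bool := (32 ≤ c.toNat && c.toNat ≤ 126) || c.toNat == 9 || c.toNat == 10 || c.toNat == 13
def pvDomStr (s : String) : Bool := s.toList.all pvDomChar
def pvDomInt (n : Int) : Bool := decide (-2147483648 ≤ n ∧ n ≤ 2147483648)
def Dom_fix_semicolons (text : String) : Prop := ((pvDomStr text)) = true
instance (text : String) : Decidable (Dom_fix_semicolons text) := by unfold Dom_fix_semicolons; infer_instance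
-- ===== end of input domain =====

-- B replaces A's split('\n')/rstrip/endswith/join over whole lines by a single left-to-right
-- character scan with a pending-run buffer (objective: alternative, same cost).

-- ===== PORT A =====
def fix_semicolons (text : String) : String :=
  let lines := PySem.Chars.splitOn text.toList ['\n']
  let result := lines.foldl (fun result line =>
    let stripped := PySem.Chars.rstrip line
    if PySem.Chars.endswith stripped [';'] then
      result ++ [PySem.Chars.slice (PySem.Chars.rstrip line) none (some (-1)) ++ [',']]
    else
      result ++ [line]) ([] : List (List Char))
  String.mk (PySem.Chars.join ['\n'] result)

-- ===== PORT B =====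
-- one step of Source B's for-loop; state = (out so far, held = pending ';'+whitespace run)
def pvAltStep (s : List Char × List Char) (c : Char) : List Char × List Char :=
  if c = '\n' then
    (s.1 ++ (if PySem.Chars.startswith s.2 [';'] then [','] else s.2) ++ ['\n'], [])
  else if c = ';' then (s.1 ++ s.2, [';'])
  else if PySem.Chars.isspace c then (s.1, s.2 ++ [c])
  else (s.1 ++ s.2 ++ [c], [])

def fix_semicolons_alt (text : String) : String :=
  let s := text.toList.foldl pvAltStep ([], [])
  String.mk (s.1 ++ (if PySem.Chars.startswith s.2 [';'] then [','] else s.2))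

-- ===== PRECONDITION & SPEC =====
def Spec_fix_semicolons (text : String) (out : String) : Prop := out = fix_semicolons_alt text
instance (text : String) (out : String) : Decidable (Spec_fix_semicolons text out) := by unfold Spec_fix_semicolons; infer_instance

-- ===== CLAIM (what is proved, stated in full; the proofs are below) =====
def Claim_equal_fix_semicolons : Prop := ∀ (text : String), Dom_fix_semicolons text → Spec_fix_semicolons text (fix_semicolons text)

-- ===== LEMMAS AND PROOFS =====

-- the per-line transformation A applies
def pvF (line : List Char) : List Char :=
  if PySem.Chars.endswith (PySem.Chars.rstrip line) [';'] then
    PySem.Chars.slice (PySem.Chars.rstrip line) none (some (-1)) ++ [',']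
  else line

-- what B flushes at end of line / end of text
def pvFinal (held : List Char) : List Char :=
  if PySem.Chars.startswith held [';'] then [','] else held

-- recursive characterisation of splitOn on separator ['\n']
def pvSplit (pre : List Char) : List Char → List (List Char)
  | [] => [pre]
  | c :: cs => if c = '\n' then pre :: pvSplit [] cs else pvSplit (pre ++ [c]) cs

-- what A produces, as a function of the character list
def pvA (cs : List Char) : List Char :=
  PySem.Chars.join ['\n'] ((pvSplit [] cs).map pvF)

-- the output B still has to produce from pending run `held` and remaining input
def pvBody : List Char → List Char → List Char
  | held, [] => pvFinal held
  | held, c :: cs =>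
    if c = '\n' then pvFinal held ++ '\n' :: pvBody [] cs
    else if c = ';' then held ++ pvBody [';'] cs
    else if PySem.Chars.isspace c then pvBody (held ++ [c]) cs
    else held ++ c :: pvBody [] cs

-- B's foldl equals the recursive pvBody
lemma pvAlt_foldl (cs : List Char) : ∀ (out held : List Char),
    (cs.foldl pvAltStep (out, held)).1 ++ pvFinal (cs.foldl pvAltStep (out, held)).2
      = out ++ pvBody held cs := by
  induction cs with
  | nil => intro out held; simp [pvBody]
  | cons c cs ih =>
    intro out held
    simp only [List.foldl_cons]
    by_cases h1 : c = '\n'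
    · rw [show pvAltStep (out, held) c
            = (out ++ (if PySem.Chars.startswith held [';'] then [','] else held) ++ ['\n'], []) from by
          simp [pvAltStep, h1], ih]
      simp [pvBody, h1, pvFinal]
    · by_cases h2 : c = ';'
      · rw [show pvAltStep (out, held) c = (out ++ held, [';']) from by simp [pvAltStep, h2], ih]
        simp [pvBody, h2]
      · by_cases h3 : PySem.Chars.isspace c
        · rw [show pvAltStep (out, held) c = (out, held ++ [c]) from by simp [pvAltStep, h1, h2, h3], ih]
          simp [pvBody, h1, h2, h3]
        · rw [show pvAltStep (out, held) c = (out ++ held ++ [c], []) from by simp [pvAltStep, h1, h2, h3], ih]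
          simp [pvBody, h1, h2, h3]

-- splitOn.go with enough fuel is pvSplit
lemma pvGo_eq : ∀ (fuel : Nat) (l cur : List Char) (accs : List (List Char)),
    l.length ≤ fuel →
    PySem.Chars.splitOn.go ['\n'] fuel l cur accs = accs.reverse ++ pvSplit cur.reverse l := by
  intro fuel
  induction fuel with
  | zero =>
    intro l cur accs h
    have hl : l = [] := List.length_eq_zero_iff.mp (Nat.le_zero.mp h)
    subst hl
    rw [PySem.Chars.splitOn.go.eq_def]
    simp [pvSplit]
  | succ fuel ih =>
    intro l cur accs h
    cases l with
    | nil =>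
      rw [PySem.Chars.splitOn.go.eq_def]
      simp [pvSplit]
    | cons c rest =>
      rw [PySem.Chars.splitOn.go.eq_def]
      by_cases hc : c = '\n'
      · subst hc
        simp only [List.isPrefixOf, BEq.rfl, Bool.true_and, if_pos, List.length_cons,
          List.length_nil, List.drop_succ_cons, List.drop_zero]
        rw [ih rest [] (cur.reverse :: accs) (by simpa using Nat.succ_le_succ_iff.mp h)]
        simp [pvSplit]
      · have hpre : List.isPrefixOf ['\n'] (c :: rest) = false := by
          simp [List.isPrefixOf]
          exact fun hh => hc hh.symm
        simp only [hpre, Bool.false_eq_true, if_neg, not_false_iff]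
        rw [ih rest (c :: cur) accs (by simpa using Nat.succ_le_succ_iff.mp h)]
        simp [pvSplit, hc]

lemma pvSplitOn_eq (s : List Char) : PySem.Chars.splitOn s ['\n'] = pvSplit [] s := by
  have := pvGo_eq (s.length + 1) s [] [] (by omega)
  simpa [PySem.Chars.splitOn] using this

lemma pvSplit_ne_nil (cs : List Char) : ∀ pre, pvSplit pre cs ≠ [] := by
  induction cs with
  | nil => intro pre; simp [pvSplit]
  | cons c cs ih => intro pre; by_cases h : c = '\n' <;> simp [pvSplit, h, ih]

lemma pvSplit_no_nl (p : List Char) : ∀ pre, (∀ c ∈ p, c ≠ '\n') → pvSplit pre p = [pre ++ p] := by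
  induction p with
  | nil => intro pre _; simp [pvSplit]
  | cons c cs ih =>
    intro pre h
    have hc : c ≠ '\n' := h c (by simp)
    simp [pvSplit, hc, ih (pre ++ [c]) (fun d hd => h d (by simp [hd]))]

lemma pvSplit_append_nl (p : List Char) : ∀ pre rest, (∀ c ∈ p, c ≠ '\n') →
    pvSplit pre (p ++ '\n' :: rest) = (pre ++ p) :: pvSplit [] rest := by
  induction p with
  | nil => intro pre rest _; simp [pvSplit]
  | cons c cs ih =>
    intro pre rest h
    have hc : c ≠ '\n' := h c (by simp)
    simp [pvSplit, hc, ih (pre ++ [c]) rest (fun d hd => h d (by simp [hd]))]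

-- rstrip facts
lemma pvRstrip_append_space (xs w : List Char) (hw : ∀ c ∈ w, PySem.Chars.isspace c = true) :
    PySem.Chars.rstrip (xs ++ w) = PySem.Chars.rstrip xs := by
  unfold PySem.Chars.rstrip
  rw [List.reverse_append, List.dropWhile_append]
  have hdw : List.dropWhile PySem.Chars.isspace w.reverse = [] := by
    rw [List.dropWhile_eq_nil_iff]
    intro c hc
    exact hw c (List.mem_reverse.mp hc)
  simp [hdw]

lemma pvRstrip_concat_nonspace (xs : List Char) (c : Char) (hc : PySem.Chars.isspace c = false) :
    PySem.Chars.rstrip (xs ++ [c]) = xs ++ [c] := by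
  unfold PySem.Chars.rstrip
  rw [List.reverse_append]
  simp [hc]

-- pvF on a line of the shape p ++ ';' ++ whitespace
lemma pvF_semi (p w : List Char) (hw : ∀ c ∈ w, PySem.Chars.isspace c = true) :
    pvF (p ++ ';' :: w) = p ++ [','] := by
  have h1 : PySem.Chars.rstrip (p ++ ';' :: w) = p ++ [';'] := by
    have h0 : p ++ ';' :: w = (p ++ [';']) ++ w := by simp
    rw [h0, pvRstrip_append_space _ _ hw, pvRstrip_concat_nonspace _ _ (by decide)]
  have h2 : PySem.Chars.endswith (p ++ [';']) [';'] = true :=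
    (PySem.Chars.endswith_iff _ _).mpr ⟨p, rfl⟩
  unfold pvF
  rw [h1, if_pos h2, PySem.Chars.slice_eq_listSlice, PySem.List.slice_to_neg_one,
    List.dropLast_concat]

-- pvF on a line with no trailing ';'
lemma pvF_nosemi (p w : List Char)
    (hp : p = [] ∨ ∃ q c, p = q ++ [c] ∧ PySem.Chars.isspace c = false ∧ c ≠ ';')
    (hw : ∀ c ∈ w, PySem.Chars.isspace c = true) :
    pvF (p ++ w) = p ++ w := by
  have h1 : PySem.Chars.rstrip (p ++ w) = p := by
    rw [pvRstrip_append_space _ _ hw]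
    rcases hp with rfl | ⟨q, c, rfl, hc, -⟩
    · rfl
    · exact pvRstrip_concat_nonspace _ _ hc
  have h2 : PySem.Chars.endswith p [';'] = false := by
    rw [Bool.eq_false_iff]
    intro hend
    obtain ⟨t, ht⟩ := (PySem.Chars.endswith_iff _ _).mp hend
    rcases hp with rfl | ⟨q, c, rfl, -, hc⟩
    · simp at ht
    · have := congrArg List.getLast? ht
      rw [List.getLast?_concat, List.getLast?_concat] at this
      exact hc (Option.some_injective _ this).symm
  unfold pvF
  rw [h1, if_neg (by simp [h2])]

-- the scan invariant
def pvInv (p held : List Char) : Prop :=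
  (∀ c ∈ p, c ≠ '\n') ∧ (∀ c ∈ held, c ≠ '\n') ∧
  ((∃ w, held = ';' :: w ∧ ∀ c ∈ w, PySem.Chars.isspace c = true) ∨
   ((∀ c ∈ held, PySem.Chars.isspace c = true) ∧
    (p = [] ∨ ∃ q c, p = q ++ [c] ∧ PySem.Chars.isspace c = false ∧ c ≠ ';')))

lemma pvF_of_inv (p held : List Char) (h : pvInv p held) :
    pvF (p ++ held) = p ++ pvFinal held := by
  obtain ⟨-, -, ⟨w, rfl, hw⟩ | ⟨hwheld, hp⟩⟩ := h
  · rw [pvF_semi p w hw]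
    have : PySem.Chars.startswith (';' :: w) [';'] = true :=
      (PySem.Chars.startswith_iff _ _).mpr ⟨w, rfl⟩
    simp [pvFinal, this]
  · rw [pvF_nosemi p held hp hwheld]
    have : PySem.Chars.startswith held [';'] = false := by
      rw [Bool.eq_false_iff]
      intro hs
      obtain ⟨t, ht⟩ := (PySem.Chars.startswith_iff _ _).mp hs
      have : PySem.Chars.isspace ';' = true := by
        apply hwheld; rw [← ht]; simp
      exact absurd this (by decide)
    simp [pvFinal, this]

-- main correspondence
lemma pvMain (cs : List Char) : ∀ p held, pvInv p held →
    p ++ pvBody held cs = pvA (p ++ held ++ cs) := by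
  induction cs with
  | nil =>
    intro p held hinv
    have hnl : ∀ c ∈ p ++ held, c ≠ '\n' := by
      intro c hc
      rcases List.mem_append.mp hc with h | h
      · exact hinv.1 c h
      · exact hinv.2.1 c h
    simp only [pvBody, pvA, List.append_nil]
    rw [pvSplit_no_nl _ [] hnl]
    simp [PySem.Chars.join_singleton, pvF_of_inv p held hinv]
  | cons c cs ih =>
    intro p held hinv
    obtain ⟨hpnl, hheldnl, hdisj⟩ := hinv
    by_cases h1 : c = '\n'
    · subst h1
      have hnl : ∀ d ∈ p ++ held, d ≠ '\n' := by
        intro d hd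
        rcases List.mem_append.mp hd with h | h
        · exact hpnl d h
        · exact hheldnl d h
      have hsplit : pvSplit [] (p ++ held ++ '\n' :: cs) = (p ++ held) :: pvSplit [] cs := by
        have := pvSplit_append_nl (p ++ held) [] cs hnl
        simpa using this
      have hne : (pvSplit [] cs).map pvF ≠ [] := by
        simp [pvSplit_ne_nil cs []]
      obtain ⟨x, xs, hx⟩ := List.exists_cons_of_ne_nil hne
      have hbody0 : pvBody [] cs = pvA cs := by
        have := ih [] [] ⟨by simp, by simp, Or.inr ⟨by simp, Or.inl rfl⟩⟩
        simpa using this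
      calc p ++ pvBody held ('\n' :: cs)
          = p ++ (pvFinal held ++ '\n' :: pvBody [] cs) := by simp [pvBody]
        _ = (p ++ pvFinal held) ++ '\n' :: pvA cs := by simp [hbody0]
        _ = pvF (p ++ held) ++ '\n' :: pvA cs := by
              rw [pvF_of_inv p held ⟨hpnl, hheldnl, hdisj⟩]
        _ = pvA (p ++ held ++ '\n' :: cs) := by
              unfold pvA
              rw [hsplit, List.map_cons, hx, PySem.Chars.join_cons_cons, ← hx]
              simp
    · by_cases h2 : c = ';'
      · subst h2
        have := ih (p ++ held) [';']
          ⟨(by intro d hd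
               rcases List.mem_append.mp hd with h | h
               exacts [hpnl d h, hheldnl d h]),
           (by intro d hd; simp at hd; subst hd; decide),
           Or.inl ⟨[], rfl, by simp⟩⟩
        calc p ++ pvBody held (';' :: cs)
            = (p ++ held) ++ pvBody [';'] cs := by simp [pvBody, h1]
          _ = pvA ((p ++ held) ++ [';'] ++ cs) := this
          _ = pvA (p ++ held ++ ';' :: cs) := by simp
      · by_cases h3 : PySem.Chars.isspace c
        · have hd' : (∃ w, held ++ [c] = ';' :: w ∧ ∀ d ∈ w, PySem.Chars.isspace d = true) ∨
              ((∀ d ∈ held ++ [c], PySem.Chars.isspace d = true) ∧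
               (p = [] ∨ ∃ q d, p = q ++ [d] ∧ PySem.Chars.isspace d = false ∧ d ≠ ';')) := by
            rcases hdisj with ⟨w, rfl, hw⟩ | ⟨hwheld, hp⟩
            · refine Or.inl ⟨w ++ [c], by simp, ?_⟩
              intro d hd
              rcases List.mem_append.mp hd with h | h
              exacts [hw d h, by simp at h; subst h; exact h3]
            · refine Or.inr ⟨?_, hp⟩
              intro d hd
              rcases List.mem_append.mp hd with h | h
              exacts [hwheld d h, by simp at h; subst h; exact h3]
          have := ih p (held ++ [c])
            ⟨hpnl,
             (by intro d hd
                 rcases List.mem_append.mp hd with h | h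
                 exacts [hheldnl d h, by simp at h; subst h; exact h1]), hd'⟩
          calc p ++ pvBody held (c :: cs)
              = p ++ pvBody (held ++ [c]) cs := by simp [pvBody, h1, h2, h3]
            _ = pvA (p ++ (held ++ [c]) ++ cs) := this
            _ = pvA (p ++ held ++ c :: cs) := by simp
        · have := ih (p ++ held ++ [c]) []
            ⟨(by intro d hd
                 rcases List.mem_append.mp hd with h | h
                 · rcases List.mem_append.mp h with h' | h'
                   exacts [hpnl d h', hheldnl d h']
                 · simp at h; subst h; exact h1),
             (by simp),
             Or.inr ⟨by simp, Or.inr ⟨p ++ held, c, rfl, Bool.eq_false_iff.mpr h3, h2⟩⟩⟩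
          calc p ++ pvBody held (c :: cs)
              = (p ++ held ++ [c]) ++ pvBody [] cs := by simp [pvBody, h1, h2, h3]
            _ = pvA ((p ++ held ++ [c]) ++ [] ++ cs) := this
            _ = pvA (p ++ held ++ c :: cs) := by simp

-- ===== VERDICT (by name: the statement is the Claim_ definition above) =====
theorem fix_semicolons_spec : Claim_equal_fix_semicolons := by
  intro text _
  unfold Spec_fix_semicolons
  have hA : fix_semicolons text = String.mk (pvA text.toList) := by
    unfold fix_semicolons pvA
    have hfun : (fun (result : List (List Char)) line =>
        if PySem.Chars.endswith (PySem.Chars.rstrip line) [';'] then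
          result ++ [PySem.Chars.slice (PySem.Chars.rstrip line) none (some (-1)) ++ [',']]
        else result ++ [line])
        = fun (result : List (List Char)) line => result ++ [pvF line] := by
      funext r line
      unfold pvF
      split <;> rfl
    simp only [hfun, PySem.List.foldl_append_singleton_eq_map, List.nil_append, pvSplitOn_eq]
  have hB : fix_semicolons_alt text = String.mk (pvBody [] text.toList) := by
    unfold fix_semicolons_alt
    have := pvAlt_foldl text.toList [] []
    simp only [pvFinal] at this
    simp only [List.nil_append] at this
    rw [← this]
  rw [hA, hB]
  have := pvMain text.toList [] [] ⟨by simp, by simp, Or.inr ⟨by simp, Or.inl rfl⟩⟩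
  simp only [List.nil_append] at this
  rw [this]
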